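-- pv_equiv track=rewrite | github.com/mmcloughlin/arrival-oopsla25-artifact | eval/process.py | clean_macro_name
-- ===== SOURCE A (Python) =====
-- def clean_macro_name(name):
--     REPLACEMENTS = [
--         ("_", ""),
--         ("0", "zero"),
--         ("1", "one"),
--         ("2", "two"),
--         ("3", "three"),
--         ("4", "four"),
--         ("5", "five"),
--         ("6", "six"),
--         ("7", "seven"),
--         ("8", "eight"),
--         ("9", "nine"),
--     ]
--     for old, new in REPLACEMENTS:
--         name = name.replace(old, new)
--     return name
-- ===== SOURCE B (Python) =====
-- _TABLE = {
--     "_": "",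
--     "0": "zero",
--     "1": "one",
--     "2": "two",
--     "3": "three",
--     "4": "four",
--     "5": "five",
--     "6": "six",
--     "7": "seven",
--     "8": "eight",
--     "9": "nine",
-- }
--
--
-- def clean_macro_name(name):
--     return "".join(_TABLE.get(c, c) for c in name)
-- ===== Notes on version B (the rewrite author's own statement) =====
-- stated objective: alternative
-- what changed: Replaces the chain of 11 full-string .replace passes by a single table-driven pass that maps each character through a dict and joins once; no replacement word contains a digit or underscore, so one pass is exact.
import Mathlib
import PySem

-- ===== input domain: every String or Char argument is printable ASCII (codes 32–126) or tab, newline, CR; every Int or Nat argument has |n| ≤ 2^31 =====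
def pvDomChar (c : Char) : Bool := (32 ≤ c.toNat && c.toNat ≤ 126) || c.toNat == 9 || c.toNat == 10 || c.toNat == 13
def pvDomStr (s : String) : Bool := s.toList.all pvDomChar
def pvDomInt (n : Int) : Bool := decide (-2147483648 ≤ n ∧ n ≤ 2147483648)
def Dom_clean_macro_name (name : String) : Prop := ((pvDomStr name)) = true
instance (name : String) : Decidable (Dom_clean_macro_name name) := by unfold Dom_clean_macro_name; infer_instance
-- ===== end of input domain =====

-- B replaces A's chain of 11 full-string replace passes by a single table-driven pass over the characters.


-- ===== PORT A =====
def pvReplacements : List (String × String) :=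
  [("_", ""), ("0", "zero"), ("1", "one"), ("2", "two"), ("3", "three"), ("4", "four"),
   ("5", "five"), ("6", "six"), ("7", "seven"), ("8", "eight"), ("9", "nine")]

def clean_macro_name (name : String) : String :=
  pvReplacements.foldl (fun n p => PySem.Str.replace n p.1 p.2) name

-- ===== PORT B =====
def pvTable : PySem.Dict Char String :=
  PySem.Dict.mk
    [('_', ""), ('0', "zero"), ('1', "one"), ('2', "two"), ('3', "three"), ('4', "four"),
     ('5', "five"), ('6', "six"), ('7', "seven"), ('8', "eight"), ('9', "nine")]

def clean_macro_name_alt (name : String) : String :=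
  PySem.Str.join "" (name.toList.map (fun c => pvTable.getD c (String.ofList [c])))

-- ===== PRECONDITION & SPEC =====
def Spec_clean_macro_name (name : String) (out : String) : Prop := out = clean_macro_name_alt name
instance (name : String) (out : String) : Decidable (Spec_clean_macro_name name out) := by unfold Spec_clean_macro_name; infer_instance

-- ===== CLAIM (what is proved, stated in full; the proofs are below) =====
def Claim_equal_clean_macro_name : Prop := ∀ (name : String), Dom_clean_macro_name name → Spec_clean_macro_name name (clean_macro_name name)

-- ===== LEMMAS AND PROOFS =====

-- one single-character replace pass, at the character-list level
def pvStep (o : Char) (new : List Char) (l : List Char) : List Char :=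
  l.flatMap (fun c => if c = o then new else [c])

-- the composition of A's eleven passes
def pvChain : List Char → List Char :=
  pvStep '9' "nine".toList ∘ pvStep '8' "eight".toList ∘ pvStep '7' "seven".toList ∘
  pvStep '6' "six".toList ∘ pvStep '5' "five".toList ∘ pvStep '4' "four".toList ∘
  pvStep '3' "three".toList ∘ pvStep '2' "two".toList ∘ pvStep '1' "one".toList ∘
  pvStep '0' "zero".toList ∘ pvStep '_' []

-- the per-character value of B's table lookup
def pvTbl (c : Char) : List Char :=
  if c = '_' then [] else if c = '0' then "zero".toList else if c = '1' then "one".toList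
  else if c = '2' then "two".toList else if c = '3' then "three".toList
  else if c = '4' then "four".toList else if c = '5' then "five".toList
  else if c = '6' then "six".toList else if c = '7' then "seven".toList
  else if c = '8' then "eight".toList else if c = '9' then "nine".toList else [c]

-- single-character replace is a flatMap over the characters
theorem go_single (o : Char) (new : List Char) :
    ∀ (s : List Char) (fuel : Nat) (acc : List Char), s.length ≤ fuel →
      PySem.Chars.replace.go [o] new fuel s acc
        = acc.reverse ++ s.flatMap (fun c => if c = o then new else [c]) := by
  intro s
  induction s with
  | nil => intro fuel acc _; cases fuel <;> simp [PySem.Chars.replace.go]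
  | cons c t ih =>
    intro fuel acc h
    cases fuel with
    | zero => simp at h
    | succ f =>
      by_cases hc : c = o
      · subst hc
        rw [PySem.Chars.replace.go]
        have hp : List.isPrefixOf [c] (c :: t) = true := by
          simp [List.isPrefixOf]
        simp only [hp, if_true]
        rw [show List.drop (List.length [c]) (c :: t) = t by simp]
        rw [ih f (new.reverse ++ acc) (by simpa using h)]
        simp
      · rw [PySem.Chars.replace.go]
        have hb : (o == c) = false := by simp [beq_iff_eq]; exact fun h' => hc h'.symm
        simp only [List.isPrefixOf, hb, Bool.false_and, Bool.false_eq_true, if_false]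
        rw [ih f (c :: acc) (by simpa using h)]
        simp [hc]

theorem replace_single (s : List Char) (o : Char) (new : List Char) :
    PySem.Chars.replace s [o] new = pvStep o new s := by
  rw [PySem.Chars.replace]
  simp only [List.isEmpty, Bool.false_eq_true, if_false]
  simpa [pvStep] using go_single o new s s.length [] le_rfl

theorem intercalate_nil_char (l : List (List Char)) :
    List.intercalate ([] : List Char) l = l.flatten := by
  induction l with
  | nil => simp [List.intercalate]
  | cons a t ih =>
    cases t with
    | nil => simp [List.intercalate]
    | cons b u =>
      simp only [List.intercalate] at *
      simp [List.intersperse] at *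
      simpa using ih

theorem tbl_lookup (c : Char) : (pvTable.getD c (String.ofList [c])).toList = pvTbl c := by
  by_cases h0 : c = '_'; · subst h0; decide
  by_cases h1 : c = '0'; · subst h1; decide
  by_cases h2 : c = '1'; · subst h2; decide
  by_cases h3 : c = '2'; · subst h3; decide
  by_cases h4 : c = '3'; · subst h4; decide
  by_cases h5 : c = '4'; · subst h5; decide
  by_cases h6 : c = '5'; · subst h6; decide
  by_cases h7 : c = '6'; · subst h7; decide
  by_cases h8 : c = '7'; · subst h8; decide
  by_cases h9 : c = '8'; · subst h9; decide
  by_cases h10 : c = '9'; · subst h10; decide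
  have e0 : ('_' == c) = false := by simp [beq_iff_eq]; exact fun h => h0 h.symm
  have e1 : ('0' == c) = false := by simp [beq_iff_eq]; exact fun h => h1 h.symm
  have e2 : ('1' == c) = false := by simp [beq_iff_eq]; exact fun h => h2 h.symm
  have e3 : ('2' == c) = false := by simp [beq_iff_eq]; exact fun h => h3 h.symm
  have e4 : ('3' == c) = false := by simp [beq_iff_eq]; exact fun h => h4 h.symm
  have e5 : ('4' == c) = false := by simp [beq_iff_eq]; exact fun h => h5 h.symm
  have e6 : ('5' == c) = false := by simp [beq_iff_eq]; exact fun h => h6 h.symm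
  have e7 : ('6' == c) = false := by simp [beq_iff_eq]; exact fun h => h7 h.symm
  have e8 : ('7' == c) = false := by simp [beq_iff_eq]; exact fun h => h8 h.symm
  have e9 : ('8' == c) = false := by simp [beq_iff_eq]; exact fun h => h9 h.symm
  have e10 : ('9' == c) = false := by simp [beq_iff_eq]; exact fun h => h10 h.symm
  have hnone : pvTable.get? c = none := by
    simp only [pvTable, PySem.Dict.get?_mk_cons, e0, e1, e2, e3, e4, e5, e6, e7, e8, e9, e10,
      Bool.false_eq_true, if_false]
    rfl
  rw [PySem.Dict.getD_eq_get?_getD, hnone]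
  simp [pvTbl, h0, h1, h2, h3, h4, h5, h6, h7, h8, h9, h10]

theorem chain_single (c : Char) : pvChain [c] = pvTbl c := by
  by_cases h0 : c = '_'; · subst h0; decide
  by_cases h1 : c = '0'; · subst h1; decide
  by_cases h2 : c = '1'; · subst h2; decide
  by_cases h3 : c = '2'; · subst h3; decide
  by_cases h4 : c = '3'; · subst h4; decide
  by_cases h5 : c = '4'; · subst h5; decide
  by_cases h6 : c = '5'; · subst h6; decide
  by_cases h7 : c = '6'; · subst h7; decide
  by_cases h8 : c = '7'; · subst h8; decide
  by_cases h9 : c = '8'; · subst h9; decide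
  by_cases h10 : c = '9'; · subst h10; decide
  simp [pvChain, pvStep, pvTbl, h0, h1, h2, h3, h4, h5, h6, h7, h8, h9, h10]

theorem chain_cons (c : Char) (t : List Char) :
    pvChain (c :: t) = pvChain [c] ++ pvChain t := by
  have : (c :: t) = [c] ++ t := rfl
  rw [this]
  simp [pvChain, pvStep]

theorem portA_toList (name : String) :
    (clean_macro_name name).toList = pvChain name.toList := by
  unfold clean_macro_name pvReplacements
  simp only [List.foldl_cons, List.foldl_nil, PySem.Str.toList_replace,
    show ("_" : String).toList = ['_'] from rfl, show ("0" : String).toList = ['0'] from rfl,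
    show ("1" : String).toList = ['1'] from rfl, show ("2" : String).toList = ['2'] from rfl,
    show ("3" : String).toList = ['3'] from rfl, show ("4" : String).toList = ['4'] from rfl,
    show ("5" : String).toList = ['5'] from rfl, show ("6" : String).toList = ['6'] from rfl,
    show ("7" : String).toList = ['7'] from rfl, show ("8" : String).toList = ['8'] from rfl,
    show ("9" : String).toList = ['9'] from rfl,
    show ("" : String).toList = [] from rfl, replace_single]
  simp only [pvChain, Function.comp_apply]

theorem portB_toList (name : String) :
    (clean_macro_name_alt name).toList = pvChain name.toList := by
  unfold clean_macro_name_alt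
  rw [PySem.Str.toList_join]
  show PySem.Chars.join [] _ = _
  rw [PySem.Chars.join, intercalate_nil_char]
  induction name.toList with
  | nil => simp [pvChain, pvStep]
  | cons c t ih =>
    rw [chain_cons]
    simp only [List.map_cons, List.flatten_cons, ih, tbl_lookup, chain_single]

-- ===== VERDICT (by name: the statement is the Claim_ definition above) =====
theorem clean_macro_name_spec : Claim_equal_clean_macro_name := by
  intro name _
  unfold Spec_clean_macro_name
  apply String.toList_injective
  rw [portA_toList, portB_toList]
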